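-- pv_equiv track=rewrite | github.com/nicolasn59/Beecrowd | AD-HOC/1140 Flores Florescem da França.py | verificarTautograma
-- ===== SOURCE A (Python) =====
-- def verificarTautograma(letras):
--     filtroDeLetras = []
--     for posicao in range(len(letras)):
--         if letras[posicao][0].lower() == letras[0][0].lower():
--             filtroDeLetras.append('Y')
--         else:
--             filtroDeLetras.append('N')
--     if 'N' in filtroDeLetras:
--         return 'N'
--     else:
--         return 'Y'
-- ===== SOURCE B (Python) =====
-- def verificarTautograma(letras):
--     firsts = {w[0].lower() for w in letras}
--     return 'Y' if len(firsts) <= 1 else 'N'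
-- ===== Notes on version B (the rewrite author's own statement) =====
-- stated objective: simpler
-- what changed: Replaces the anchor-comparison loop that accumulates a 'Y'/'N' flag list and then scans it for 'N' with a one-line set comprehension: collect the distinct lowercased first letters and answer 'Y' iff at most one distinct letter exists (no flag list is built or rescanned).
import Mathlib
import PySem

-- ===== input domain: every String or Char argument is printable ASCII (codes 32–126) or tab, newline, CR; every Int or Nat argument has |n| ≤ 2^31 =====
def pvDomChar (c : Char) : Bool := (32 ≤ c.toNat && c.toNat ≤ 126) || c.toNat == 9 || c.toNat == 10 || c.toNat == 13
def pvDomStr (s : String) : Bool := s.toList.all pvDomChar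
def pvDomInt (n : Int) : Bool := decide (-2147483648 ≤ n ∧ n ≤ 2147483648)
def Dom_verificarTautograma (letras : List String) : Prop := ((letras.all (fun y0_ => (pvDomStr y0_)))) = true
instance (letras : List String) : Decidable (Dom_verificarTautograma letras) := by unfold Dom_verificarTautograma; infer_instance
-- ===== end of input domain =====

-- B replaces A's anchor-comparison loop with a flag list by a "distinct lowercased first letters" set (simpler).
-- w[0].lower() on a one-character string: index 0 then lowercase (none = IndexError on the empty word).
def pvFirstLower (w : String) : Option Char :=
  (PySem.Str.pyGet? w 0).map PySem.Chars.lowerChar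

-- ===== PORT A =====
def verificarTautograma (letras : List String) : String :=
  let filtroDeLetras :=
    (PySem.List.pyRange 0 (letras.length : Int)).foldl
      (fun acc posicao =>
        if pvFirstLower (PySem.List.pyGetD letras posicao "") =
            pvFirstLower (PySem.List.pyGetD letras 0 "") then
          acc ++ ["Y"]
        else
          acc ++ ["N"]) []
  if "N" ∈ filtroDeLetras then "N" else "Y"

-- ===== PORT B =====
def verificarTautograma_alt (letras : List String) : String :=
  let firsts := PySem.Set.ofList (letras.map pvFirstLower)
  if PySem.Set.len firsts ≤ 1 then "Y" else "N"

-- ===== PRECONDITION & SPEC =====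
-- Pre_ excludes lists containing an empty-string word: there both Pythons raise IndexError on w[0].
def Pre_verificarTautograma (letras : List String) : Prop := ∀ w ∈ letras, w ≠ ""
instance (letras : List String) : Decidable (Pre_verificarTautograma letras) := by unfold Pre_verificarTautograma; infer_instance
def pvWitness_verificarTautograma : List String := ["Roma", "rima"]
def Spec_verificarTautograma (letras : List String) (out : String) : Prop := out = verificarTautograma_alt letras
instance (letras : List String) (out : String) : Decidable (Spec_verificarTautograma letras out) := by unfold Spec_verificarTautograma; infer_instance

-- ===== CLAIM (what is proved, stated in full; the proofs are below) =====
def Claim_equal_verificarTautograma : Prop := ∀ (letras : List String), Dom_verificarTautograma letras → Pre_verificarTautograma letras → Spec_verificarTautograma letras (verificarTautograma letras)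

-- ===== LEMMAS AND PROOFS =====

-- A's loop: appending 'Y'/'N' per element is mapping the branch over the list.
lemma foldYN (c : Option Char) (l : List String) (acc : List String) :
    l.foldl (fun acc w => if pvFirstLower w = c then acc ++ ["Y"] else acc ++ ["N"]) acc
      = acc ++ l.map (fun w => if pvFirstLower w = c then "Y" else "N") := by
  induction l generalizing acc with
  | nil => simp
  | cons x xs ih =>
    simp only [List.foldl_cons, List.map_cons]
    split_ifs <;> simp [ih]

-- a duplicate-free list has at most one element iff all its elements coincide
-- a duplicate-free list has at most one element iff all its elements coincide
lemma nodup_len_le_one {α : Type} (l : List α) (h : l.Nodup) :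
    l.length ≤ 1 ↔ ∀ a ∈ l, ∀ b ∈ l, a = b := by
  match l with
  | [] => simp
  | [a] => simp
  | a :: b :: t =>
    constructor
    · intro hlen; simp at hlen
    · intro hall
      have hab : a = b := hall a (by simp) b (by simp)
      have hna : a ∉ b :: t := (List.nodup_cons.mp h).1
      simp [hab] at hna

lemma set_len_le_one {α : Type} [BEq α] [LawfulBEq α] (xs : List α) :
    PySem.Set.len (PySem.Set.ofList xs) ≤ 1 ↔ ∀ a ∈ xs, ∀ b ∈ xs, a = b := by
  have h := nodup_len_le_one (PySem.Set.ofList xs) (PySem.Set.nodup_ofList xs)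
  simp only [PySem.Set.mem_ofList] at h
  rw [← h]
  simp [PySem.Set.len]

lemma main_cons (a : String) (l : List String) :
    verificarTautograma (a :: l) = verificarTautograma_alt (a :: l) := by
  simp only [verificarTautograma, verificarTautograma_alt]
  have hanchor : PySem.List.pyGetD (a :: l) 0 "" = a := by
    simp [PySem.List.pyGetD, PySem.List.pyGet?, PySem.List.pyIdx?]
  have hfold :
      List.foldl
        (fun acc posicao =>
          if pvFirstLower (PySem.List.pyGetD (a :: l) posicao "") =
              pvFirstLower (PySem.List.pyGetD (a :: l) 0 "") then
            acc ++ ["Y"]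
          else acc ++ ["N"]) [] (PySem.List.pyRange 0 ((a :: l).length : Int))
        = List.foldl
            (fun acc w => if pvFirstLower w = pvFirstLower a then acc ++ ["Y"] else acc ++ ["N"])
            [] (a :: l) := by
    rw [hanchor]
    exact PySem.List.foldl_pyRange_zero_pyGetD' (a :: l) ""
      (fun acc w => if pvFirstLower w = pvFirstLower a then acc ++ ["Y"] else acc ++ ["N"]) []
  rw [hfold, foldYN]
  by_cases hall : ∀ w ∈ l, pvFirstLower w = pvFirstLower a
  · have h1 : "N" ∉ [] ++ (a :: l).map (fun w => if pvFirstLower w = pvFirstLower a then "Y" else "N") := by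
      simp only [List.nil_append, List.mem_map, List.mem_cons, not_exists]
      rintro w ⟨hw | hw, hval⟩
      · simp [hw] at hval
      · simp [hall w hw] at hval
    have h2 : ∀ x ∈ (a :: l).map pvFirstLower, ∀ y ∈ (a :: l).map pvFirstLower, x = y := by
      simp only [List.mem_map, List.mem_cons]
      rintro x ⟨u, hu, rfl⟩ y ⟨v, hv, rfl⟩
      have hu' : pvFirstLower u = pvFirstLower a := by
        rcases hu with rfl | hu
        · rfl
        · exact hall u hu
      have hv' : pvFirstLower v = pvFirstLower a := by
        rcases hv with rfl | hv
        · rfl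
        · exact hall v hv
      rw [hu', hv']
    rw [if_neg (by simpa using h1), if_pos ((set_len_le_one _).mpr h2)]
  · push Not at hall
    obtain ⟨w, hw, hne⟩ := hall
    have h1 : "N" ∈ [] ++ (a :: l).map (fun w => if pvFirstLower w = pvFirstLower a then "Y" else "N") := by
      simp only [List.nil_append, List.mem_map]
      exact ⟨w, List.mem_cons_of_mem a hw, by simp [hne]⟩
    have h2 : ¬ ∀ x ∈ (a :: l).map pvFirstLower, ∀ y ∈ (a :: l).map pvFirstLower, x = y := by
      intro h
      exact hne (h (pvFirstLower w) (List.mem_map_of_mem (List.mem_cons_of_mem a hw))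
        (pvFirstLower a) (List.mem_map_of_mem List.mem_cons_self))
    rw [if_pos h1, if_neg (fun hc => h2 ((set_len_le_one _).mp hc))]

-- ===== VERDICT (by name: the statement is the Claim_ definition above) =====
theorem verificarTautograma_spec : Claim_equal_verificarTautograma := by
  intro letras _ _
  unfold Spec_verificarTautograma
  cases letras with
  | nil => decide
  | cons a l => exact main_cons a l
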